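-- pv_equiv track=rewrite | github.com/AnveshJarabani/LEETCODE-PYTHON | 482Licensekey.py | lk
-- ===== SOURCE A (Python) =====
-- def lk(s, k):
--     s = s.replace("-", "").upper()[::-1]
--     st = ""
--     for i in range(0, len(s), k):
--         st += s[i : i + k] + "-"
--     st = st[::-1]
--     st = st.replace("-", "", 1)
--     return st
-- ===== SOURCE B (Python) =====
-- def lk(s, k):
--     t = s.replace("-", "").upper()
--     groups = [t[max(o - k, 0):o] for o in range(len(t), 0, -k)]
--     return "-".join(reversed(groups))
-- ===== Notes on version B (the rewrite author's own statement) =====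
-- stated objective: simpler
-- what changed: B drops A's reverse/chunk/reverse/strip-first-dash scheme: it slices the groups out of the cleaned string directly (offsets counting down from the end, so the leftover short group naturally comes first) and joins them with '-', with no string reversal and no dash stripping.
import Mathlib
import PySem

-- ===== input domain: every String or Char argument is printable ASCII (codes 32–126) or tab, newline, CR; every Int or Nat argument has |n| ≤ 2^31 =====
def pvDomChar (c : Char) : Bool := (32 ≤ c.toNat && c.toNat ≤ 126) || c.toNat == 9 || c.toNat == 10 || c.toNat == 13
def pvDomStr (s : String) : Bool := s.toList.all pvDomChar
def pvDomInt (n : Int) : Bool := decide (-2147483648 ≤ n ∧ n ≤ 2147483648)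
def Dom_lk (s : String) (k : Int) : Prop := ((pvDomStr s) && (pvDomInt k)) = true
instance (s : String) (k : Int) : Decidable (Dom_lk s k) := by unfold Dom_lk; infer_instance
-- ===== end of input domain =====

-- B slices the dash-groups directly out of the cleaned string (offsets counting down from the
-- end, so the leftover short group naturally comes first) and joins them with '-', instead of
-- A's reverse / chunk-forward / reverse / strip-first-dash scheme. Return values only (no
-- argument is mutated by either version).

-- ===== PORT A =====
-- s.replace("-", "", 1): PySem.Chars.replace has no count parameter, so the count=1 form is
-- ported by hand; exact: removes the first occurrence of '-' (a one-char pattern) and nothing else.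
def lkDropFirstDash : List Char → List Char
  | [] => []
  | c :: cs => if c = '-' then cs else c :: lkDropFirstDash cs

def lk (s : String) (k : Int) : String :=
  -- s = s.replace("-", "").upper()[::-1]   ([::-1] = reverse, exact per Str.slice?_none_none_neg_one)
  let t : List Char := (PySem.Chars.upper (PySem.Chars.replace s.toList ['-'] [])).reverse
  -- st = ""; for i in range(0, len(s), k): st += s[i : i + k] + "-"
  let st : List Char := (PySem.List.pyRange 0 (t.length : Int) k).foldl
      (fun acc i => acc ++ PySem.List.slice t (some i) (some (i + k)) ++ ['-']) []
  -- st = st[::-1]; st = st.replace("-", "", 1); return st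
  String.ofList (lkDropFirstDash st.reverse)

-- ===== PORT B =====
def lk_alt (s : String) (k : Int) : String :=
  -- t = s.replace("-", "").upper()
  let t : List Char := PySem.Chars.upper (PySem.Chars.replace s.toList ['-'] [])
  -- groups = [t[max(o - k, 0):o] for o in range(len(t), 0, -k)]
  let groups : List (List Char) := (PySem.List.pyRange (t.length : Int) 0 (-k)).map
      (fun o => PySem.List.slice t (some (max (o - k) 0)) (some o))
  -- return "-".join(reversed(groups))
  String.ofList (PySem.Chars.join ['-'] groups.reverse)

-- ===== PRECONDITION & SPEC =====
-- Python A raises ValueError (range() arg 3 must not be zero) exactly when k == 0; B raises the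
-- same error there, so only k ≠ 0 is excluded.
def Pre_lk (s : String) (k : Int) : Prop := k ≠ 0
instance (s : String) (k : Int) : Decidable (Pre_lk s k) := by unfold Pre_lk; infer_instance
def pvWitness_lk : String × Int := ("2-5g-3-J", 2)

def Spec_lk (s : String) (k : Int) (out : String) : Prop := out = lk_alt s k
instance (s : String) (k : Int) (out : String) : Decidable (Spec_lk s k out) := by unfold Spec_lk; infer_instance

-- ===== CLAIM (what is proved, stated in full; the proofs are below) =====
def Claim_equal_lk : Prop := ∀ (s : String) (k : Int), Dom_lk s k → Pre_lk s k → Spec_lk s k (lk s k)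

-- ===== LEMMAS AND PROOFS =====

-- Core identity, stated over Nat: for a string t cut into c groups of size κ (the first group
-- possibly short), the reversal of A's forward concatenation over the reversed string is a dash
-- followed by B's join of the groups.
theorem lk_core (κ : Nat) (hκ : 0 < κ) : ∀ (c : Nat) (t : List Char),
    t.length ≤ c * κ → (c = 0 ∨ (c - 1) * κ < t.length) →
    ((List.range c).flatMap (fun j => (t.reverse.drop (κ * j)).take κ ++ ['-'])).reverse
      = if c = 0 then ([] : List Char) else
        '-' :: PySem.Chars.join ['-'] (((List.range c).map
            (fun j => (t.drop (t.length - κ * j - κ)).take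
              ((t.length - κ * j) - (t.length - κ * j - κ)))).reverse) := by
  intro c
  induction c with
  | zero =>
    intro t h1 _
    simp at h1 ⊢
  | succ c ih =>
    intro t h1 h2
    have e1 : (c + 1) * κ = c * κ + κ := by ring
    have e2 : κ * c = c * κ := by ring
    have hlen : c * κ < t.length := by
      rcases h2 with h | h
      · omega
      · simpa using h
    set n := t.length with hn
    set t' := t.drop (n - c * κ) with ht'
    have hlen' : t'.length = c * κ := by
      simp [ht']; omega
    have htrev : t'.reverse = t.reverse.take (c * κ) := by
      rw [ht', List.reverse_drop]
      congr 1
      omega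
    -- A-side chunks of t for j < c are the chunks of t'
    have hchunkA : ∀ j ∈ List.range c,
        ((t.reverse.drop (κ * j)).take κ ++ ['-']) = ((t'.reverse.drop (κ * j)).take κ ++ ['-']) := by
      intro j hj
      rw [List.mem_range] at hj
      have hjk : κ * j + κ ≤ c * κ := by
        have := Nat.mul_le_mul_left κ (Nat.succ_le_of_lt hj)
        calc κ * j + κ = κ * (j + 1) := by ring
        _ ≤ κ * c := this
        _ = c * κ := by ring
      rw [htrev, List.drop_take, List.take_take]
      congr 2
      omega
    have hflatA : (List.range c).flatMap (fun j => (t.reverse.drop (κ * j)).take κ ++ ['-'])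
        = (List.range c).flatMap (fun j => (t'.reverse.drop (κ * j)).take κ ++ ['-']) := by
      rw [List.flatMap_def, List.flatMap_def, List.map_congr_left hchunkA]
    -- B-side groups of t for j < c are the groups of t'
    have hchunkB : ∀ j ∈ List.range c,
        (t.drop (n - κ * j - κ)).take ((n - κ * j) - (n - κ * j - κ))
          = (t'.drop (t'.length - κ * j - κ)).take
              ((t'.length - κ * j) - (t'.length - κ * j - κ)) := by
      intro j hj
      rw [List.mem_range] at hj
      have hjk : κ * j + κ ≤ c * κ := by
        have := Nat.mul_le_mul_left κ (Nat.succ_le_of_lt hj)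
        calc κ * j + κ = κ * (j + 1) := by ring
        _ ≤ κ * c := this
        _ = c * κ := by ring
      rw [hlen', ht', List.drop_drop]
      have hA : n - κ * j - (n - κ * j - κ) = c * κ - κ * j - (c * κ - κ * j - κ) := by omega
      have hB : n - κ * j - κ = n - c * κ + (c * κ - κ * j - κ) := by omega
      rw [hA, hB]
    -- top chunk / first group
    have htopA : (t.reverse.drop (κ * c)).take κ = t.reverse.drop (κ * c) := by
      apply List.take_of_length_le
      simp
      omega
    have htopArev : (t.reverse.drop (κ * c)).reverse = t.take (n - κ * c) := by
      rw [List.reverse_drop, List.reverse_reverse, List.length_reverse, ← hn]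
    have htopB : (t.drop (n - κ * c - κ)).take ((n - κ * c) - (n - κ * c - κ))
        = t.take (n - κ * c) := by
      have h0 : n - κ * c - κ = 0 := by omega
      rw [h0]
      simp [mul_comm κ c]
    -- unfold the (c+1)-step on both sides
    rw [List.range_succ, List.flatMap_append, hflatA, if_neg (Nat.succ_ne_zero c)]
    rw [List.map_append, List.map_congr_left hchunkB]
    simp only [List.flatMap_cons, List.flatMap_nil, List.map_cons, List.map_nil,
      List.append_nil, List.reverse_append, List.reverse_cons, List.reverse_nil,
      List.nil_append, List.cons_append, htopA, htopArev, htopB]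
    -- now use the induction hypothesis on t'
    have ihv := ih t' (le_of_eq hlen') (by
      rcases Nat.eq_zero_or_pos c with hc | hc
      · exact Or.inl hc
      · refine Or.inr ?_
        rw [hlen']
        have h4 : c - 1 + 1 = c := by omega
        have h3 : (c - 1 + 1) * κ = (c - 1) * κ + κ := by ring
        rw [h4] at h3
        omega)
    rcases Nat.eq_zero_or_pos c with hc | hc
    · subst hc
      simp only [List.range_zero, List.flatMap_nil, List.reverse_nil, List.map_nil] at ihv ⊢
      rw [PySem.Chars.join_singleton]
      simp
    · rw [if_neg (Nat.pos_iff_ne_zero.mp hc)] at ihv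
      obtain ⟨y, rest, hyr⟩ :
          ∃ y rest, (((List.range c).map (fun j => (t'.drop (t'.length - κ * j - κ)).take
              ((t'.length - κ * j) - (t'.length - κ * j - κ)))).reverse) = y :: rest := by
        have hne : (((List.range c).map (fun j => (t'.drop (t'.length - κ * j - κ)).take
            ((t'.length - κ * j) - (t'.length - κ * j - κ)))).reverse) ≠ [] := by
          simp [List.range_eq_nil]
          omega
        match h : (((List.range c).map (fun j => (t'.drop (t'.length - κ * j - κ)).take
            ((t'.length - κ * j) - (t'.length - κ * j - κ)))).reverse) with
        | [] => exact absurd h hne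
        | y :: rest => exact ⟨y, rest, rfl⟩
      rw [hyr] at ihv ⊢
      rw [ihv, PySem.Chars.join_cons_cons]
      simp

-- range(0, n, k) with k < 0 and range(n, 0, k) with k > 0 are empty for n ≥ 0
theorem lk_pyRange_neg_empty (n k : Int) (h : 0 ≤ n) (hk : k < 0) :
    PySem.List.pyRange 0 n k = [] := by
  simp [PySem.List.pyRange, hk.ne, not_lt.mpr hk.le, not_lt.mpr h]

theorem lk_pyRange_down_empty (n k : Int) (h : 0 ≤ n) (hk : 0 < k) :
    PySem.List.pyRange n 0 k = [] := by
  simp [PySem.List.pyRange, hk.ne', not_lt.mpr h]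
  omega

-- range(0, n, k), k > 0, as a map over List.range
theorem lk_pyRange_up (n k : Int) (hk : 0 < k) (hn : 0 < n) :
    PySem.List.pyRange 0 n k
      = (List.range ((n + k - 1) / k).toNat).map (fun (j : Nat) => k * (j : Int)) := by
  rw [PySem.List.pyRange_of_pos 0 n hk, if_pos hn]
  have h1 : n - 0 + k - 1 = n + k - 1 := by ring
  rw [h1]
  exact List.map_congr_left (fun j _ => by simp)

-- range(n, 0, -k), k > 0, as a map over List.range
theorem lk_pyRange_down (n k : Int) (hk : 0 < k) (hn : 0 < n) :
    PySem.List.pyRange n 0 (-k)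
      = (List.range ((n + k - 1) / k).toNat).map (fun (j : Nat) => n - k * (j : Int)) := by
  have hne : -k ≠ 0 := by omega
  have h2 : ¬ (0 : Int) < -k := by omega
  simp only [PySem.List.pyRange, if_neg hne, if_neg h2, if_pos hn, neg_neg, sub_zero]
  exact List.map_congr_left (fun j _ => by ring)

-- the ceiling count c = ⌈n0/κ⌉ computed by range satisfies (c-1)κ < n0 ≤ cκ and c ≥ 1
theorem lk_count (κ n0 : Nat) (hκ : 0 < κ) (hn : 0 < n0) :
    n0 ≤ (((n0 : Int) + κ - 1) / κ).toNat * κ ∧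
    ((((n0 : Int) + κ - 1) / κ).toNat - 1) * κ < n0 ∧
    0 < (((n0 : Int) + κ - 1) / κ).toNat := by
  have hκ' : (0 : Int) < κ := by exact_mod_cast hκ
  set a : Int := (n0 : Int) + κ - 1 with ha
  set q : Int := a / κ with hq
  have key : (κ : Int) * q + a % κ = a := Int.mul_ediv_add_emod a κ
  have hm0 : 0 ≤ a % κ := Int.emod_nonneg a (by omega)
  have hm1 : a % κ < κ := Int.emod_lt_of_pos a hκ'
  have hn0' : (0 : Int) < n0 := by exact_mod_cast hn
  have hn1 : (n0 : Int) ≤ κ * q := by omega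
  have hn2 : κ * q - κ < n0 := by omega
  have hq1 : 1 ≤ q := by
    rcases lt_trichotomy q 1 with h | h | h
    · have h5 : (κ : Int) * q ≤ 0 := mul_nonpos_of_nonneg_of_nonpos hκ'.le (by omega)
      omega
    · omega
    · omega
  have hqt : ((q.toNat : Int)) = q := Int.toNat_of_nonneg (by omega)
  refine ⟨?_, ?_, by omega⟩
  · have h6 : (n0 : Int) ≤ (q.toNat : Int) * κ := by rw [hqt]; linarith [hn1]
    exact_mod_cast h6
  · have h7 : 1 ≤ q.toNat := by omega
    have h8 : (((q.toNat - 1 : Nat)) : Int) * κ < n0 := by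
      rw [Nat.cast_sub h7, hqt]
      have e : (q - ((1 : Nat) : Int)) * κ = κ * q - κ := by push_cast; ring
      rw [e]
      exact hn2
    exact_mod_cast h8

-- ===== VERDICT (by name: the statement is the Claim_ definition above) =====
theorem lk_spec : Claim_equal_lk := by
  unfold Claim_equal_lk
  intro s k _ hk
  unfold Pre_lk at hk
  unfold Spec_lk lk lk_alt
  simp only [List.length_reverse]
  set t0 : List Char := PySem.Chars.upper (PySem.Chars.replace s.toList ['-'] []) with ht0
  rcases lt_trichotomy k 0 with hneg | hz | hpos
  · -- k < 0: both ranges are empty, both results are ""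
    rw [lk_pyRange_neg_empty _ _ (by positivity) hneg,
        lk_pyRange_down_empty _ _ (by positivity) (by omega)]
    simp [lkDropFirstDash, PySem.Chars.join_nil]
  · exact absurd hz hk
  · -- k > 0
    set κ := k.toNat with hκdef
    have hkc : (κ : Int) = k := Int.toNat_of_nonneg hpos.le
    have hκ : 0 < κ := by omega
    by_cases h0 : t0.length = 0
    · -- empty cleaned string: both ranges are empty
      rw [h0]
      have hA : PySem.List.pyRange 0 ((0 : Nat) : Int) k = [] := by
        simp [PySem.List.pyRange, hk]
      have hB : PySem.List.pyRange ((0 : Nat) : Int) 0 (-k) = [] := by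
        simp [PySem.List.pyRange, hk]
      rw [hA, hB]
      simp [lkDropFirstDash, PySem.Chars.join_nil]
    · have hn : 0 < t0.length := Nat.pos_of_ne_zero h0
      have hn' : (0 : Int) < (t0.length : Int) := by exact_mod_cast hn
      rw [← hkc]
      set c := (((t0.length : Int) + κ - 1) / κ).toNat with hcdef
      obtain ⟨hc1, hc2, hc3⟩ := lk_count κ t0.length hκ hn
      rw [← hcdef] at hc1 hc2 hc3
      rw [lk_pyRange_up _ _ (by exact_mod_cast hκ) hn',
          lk_pyRange_down _ _ (by exact_mod_cast hκ) hn']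
      rw [List.foldl_map, List.map_map]
      -- A-side: each slice is a Nat-indexed chunk of the reversed string
      have hfa : (List.range c).foldl
            (fun acc (j : Nat) => acc ++ PySem.List.slice t0.reverse (some ((κ : Int) * (j : Int)))
                (some ((κ : Int) * (j : Int) + κ)) ++ ['-']) []
          = (List.range c).foldl
            (fun acc j => acc ++ ((t0.reverse.drop (κ * j)).take κ ++ ['-'])) [] := by
        apply PySem.List.foldl_congr_mem
        intro acc j _
        have ha : (0 : Int) ≤ (κ : Int) * (j : Int) := by positivity
        have hb : (0 : Int) ≤ (κ : Int) * (j : Int) + κ := by positivity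
        rw [PySem.List.slice_toNat _ ha hb]
        have e0 : ((κ * j : Nat) : Int) = (κ : Int) * (j : Int) := by push_cast; ring
        have e1 : ((κ : Int) * (j : Int)).toNat = κ * j := by rw [← e0, Int.toNat_natCast]
        have e2 : ((κ : Int) * (j : Int) + κ).toNat = κ * j + κ := by rw [← e0]; omega
        rw [e1, e2]
        have e3 : κ * j + κ - κ * j = κ := by omega
        rw [e3, List.append_assoc]
      rw [hfa, PySem.List.foldl_append_eq_flatMap, List.nil_append]
      -- B-side: each slice is a Nat-indexed group of the cleaned string
      have hgb : (List.range c).map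
            ((fun o => PySem.List.slice t0 (some (max (o - (κ : Int)) 0)) (some o)) ∘
              (fun (j : Nat) => ((t0.length : Int) - (κ : Int) * (j : Int))))
          = (List.range c).map (fun j => (t0.drop (t0.length - κ * j - κ)).take
              ((t0.length - κ * j) - (t0.length - κ * j - κ))) := by
        apply List.map_congr_left
        intro j hj
        rw [List.mem_range] at hj
        have h8 : κ * j + κ ≤ c * κ := by
          have := Nat.mul_le_mul_left κ (Nat.succ_le_of_lt hj)
          calc κ * j + κ = κ * (j + 1) := by ring
          _ ≤ κ * c := this
          _ = c * κ := by ring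
        have h9 : c * κ - κ < t0.length := by
          have e4 : (c - 1) * κ = c * κ - κ := Nat.sub_one_mul c κ
          omega
        have e0 : ((κ * j : Nat) : Int) = (κ : Int) * (j : Int) := by push_cast; ring
        simp only [Function.comp, ← e0]
        have hb0 : (0 : Int) ≤ (t0.length : Int) - ((κ * j : Nat) : Int) := by omega
        rw [PySem.List.slice_toNat _ (le_max_right _ _) hb0]
        have e5 : (max ((t0.length : Int) - ((κ * j : Nat) : Int) - (κ : Int)) 0).toNat
            = t0.length - κ * j - κ := by omega
        have e6 : ((t0.length : Int) - ((κ * j : Nat) : Int)).toNat = t0.length - κ * j := by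
          omega
        rw [e5, e6]
      rw [hgb]
      -- core identity
      rw [lk_core κ hκ c t0 hc1 (Or.inr hc2), if_neg (by omega : ¬ c = 0)]
      simp [lkDropFirstDash]
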